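-- pv_equiv track=rewrite | github.com/aidancordero2/poolparty-statetracker | poolparty/src/poolparty/codon_tables.py | _build_mutation_lookup
-- ===== SOURCE A (Python) =====
-- def _build_mutation_lookup(
--     aa_to_codons: dict,
--     codon_to_aa: dict,
--     synonymous: dict,
--     stop_codons: list,
--     all_codons: list,
-- ) -> dict:
--     """Build mutation lookup tables for all mutation types.
--
--     Mutation types:
--     - any_codon: All 63 other codons (uniform)
--     - nonsynonymous_first: First codon of each different amino acid including stop (uniform)
--     - nonsynonymous_random: All codons encoding different amino acids including stop (non-uniform)
--     - missense_only_first: First codon of each different AA, excluding stop (uniform)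
--     - missense_only_random: All codons for different AAs, excluding stop (non-uniform)
--     - synonymous: Synonymous codons only (non-uniform)
--     - nonsense: Stop codons for non-stop codons, empty for stops (uniform)
--
--     Returns:
--         Dict mapping mutation_type -> codon -> list of alternative codons
--     """
--     lookup: dict[str, dict[str, list[str]]] = {}
--
--     # 1. any_codon: all other codons
--     lookup['any_codon'] = {
--         codon: [c for c in all_codons if c != codon]
--         for codon in all_codons
--     }
--
--     # 2. nonsynonymous_first: different AA/stop, first codon
--     lookup['nonsynonymous_first'] = {}
--     for codon in all_codons:
--         current_aa = codon_to_aa[codon]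
--         lookup['nonsynonymous_first'][codon] = [
--             aa_to_codons[aa][0]
--             for aa in aa_to_codons.keys()
--             if aa != current_aa
--         ]
--
--     # 3. nonsynonymous_random: different AA/stop, all codons
--     lookup['nonsynonymous_random'] = {}
--     for codon in all_codons:
--         current_aa = codon_to_aa[codon]
--         mutations = []
--         for aa, codon_list in aa_to_codons.items():
--             if aa != current_aa:
--                 mutations.extend(codon_list)
--         lookup['nonsynonymous_random'][codon] = mutations
--
--     # 4. missense_only_first: different AA, first codon, NO stop
--     lookup['missense_only_first'] = {}
--     for codon in all_codons:
--         current_aa = codon_to_aa[codon]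
--         lookup['missense_only_first'][codon] = [
--             aa_to_codons[aa][0]
--             for aa in aa_to_codons.keys()
--             if aa != current_aa and aa != '*'
--         ]
--
--     # 5. missense_only_random: different AA, all codons, NO stop
--     lookup['missense_only_random'] = {}
--     for codon in all_codons:
--         current_aa = codon_to_aa[codon]
--         mutations = []
--         for aa, codon_list in aa_to_codons.items():
--             if aa != current_aa and aa != '*':
--                 mutations.extend(codon_list)
--         lookup['missense_only_random'][codon] = mutations
--
--     # 6. synonymous: synonymous codons (copy to avoid mutation)
--     lookup['synonymous'] = {
--         codon: syns[:] for codon, syns in synonymous.items()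
--     }
--
--     # 7. nonsense: stop codons for non-stop codons
--     lookup['nonsense'] = {
--         codon: [] if codon in stop_codons else stop_codons[:]
--         for codon in all_codons
--     }
--
--     return lookup
-- ===== SOURCE B (Python) =====
-- def _build_mutation_lookup(
--     aa_to_codons: dict,
--     codon_to_aa: dict,
--     synonymous: dict,
--     stop_codons: list,
--     all_codons: list,
-- ) -> dict:
--     """Same tables as A, via a memoized per-amino-acid index and one pass over all_codons."""
--     items = list(aa_to_codons.items())
--
--     def row(aa):
--         # The four "different AA" lists for one amino acid, computed once.
--         ns_f, ns_r, mo_f, mo_r = [], [], [], []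
--         for x, cl in items:
--             if x != aa:
--                 ns_f.append(cl[0])
--                 ns_r.extend(cl)
--                 if x != '*':
--                     mo_f.append(cl[0])
--                     mo_r.extend(cl)
--         return ns_f, ns_r, mo_f, mo_r
--
--     cache = {}
--     ns_first, ns_rand, mo_first, mo_rand = {}, {}, {}, {}
--     for codon in all_codons:
--         aa = codon_to_aa[codon]
--         if aa not in cache:
--             cache[aa] = row(aa)
--         ns_f, ns_r, mo_f, mo_r = cache[aa]
--         ns_first[codon] = ns_f[:]
--         ns_rand[codon] = ns_r[:]
--         mo_first[codon] = mo_f[:]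
--         mo_rand[codon] = mo_r[:]
--
--     return {
--         'any_codon': {
--             codon: [c for c in all_codons if c != codon]
--             for codon in all_codons
--         },
--         'nonsynonymous_first': ns_first,
--         'nonsynonymous_random': ns_rand,
--         'missense_only_first': mo_first,
--         'missense_only_random': mo_rand,
--         'synonymous': {codon: syns[:] for codon, syns in synonymous.items()},
--         'nonsense': {
--             codon: [] if codon in stop_codons else stop_codons[:]
--             for codon in all_codons
--         },
--     }
-- ===== Notes on version B (the rewrite author's own statement) =====
-- stated objective: alternative
-- what changed: B builds a memoized per-amino-acid index (the four 'different AA' lists computed once per amino acid, on demand) and fills the four AA-dependent tables in a single lookup-and-copy pass over all_codons, instead of rescanning aa_to_codons four separate times for every codon as A does.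
import Mathlib
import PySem

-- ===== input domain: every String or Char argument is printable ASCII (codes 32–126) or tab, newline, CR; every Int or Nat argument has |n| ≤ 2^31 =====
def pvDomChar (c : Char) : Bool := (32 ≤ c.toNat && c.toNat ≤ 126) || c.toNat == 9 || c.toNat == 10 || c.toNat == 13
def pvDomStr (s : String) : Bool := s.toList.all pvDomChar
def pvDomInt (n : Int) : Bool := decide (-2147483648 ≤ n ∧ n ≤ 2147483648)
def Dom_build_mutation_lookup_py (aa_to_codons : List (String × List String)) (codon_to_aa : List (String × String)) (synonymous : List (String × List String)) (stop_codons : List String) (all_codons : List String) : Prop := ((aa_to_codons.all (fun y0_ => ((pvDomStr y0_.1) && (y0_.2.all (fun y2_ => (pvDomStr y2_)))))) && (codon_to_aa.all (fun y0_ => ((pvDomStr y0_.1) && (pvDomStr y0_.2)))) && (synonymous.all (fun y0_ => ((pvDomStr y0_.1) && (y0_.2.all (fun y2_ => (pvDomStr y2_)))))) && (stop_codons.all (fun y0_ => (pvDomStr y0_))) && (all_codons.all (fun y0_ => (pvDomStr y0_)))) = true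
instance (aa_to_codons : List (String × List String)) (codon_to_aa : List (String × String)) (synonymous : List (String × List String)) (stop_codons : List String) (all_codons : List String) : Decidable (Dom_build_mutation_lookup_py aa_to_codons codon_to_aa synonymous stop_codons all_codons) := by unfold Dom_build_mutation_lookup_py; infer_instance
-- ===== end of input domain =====

-- B replaces A's four repeated scans of aa_to_codons per codon with a memoized per-amino-acid
-- index consulted in a single pass over all_codons (same tables, different decomposition).

-- ===== PORT A =====
-- Literal port of A. Python dict parameters are association lists with distinct keys (Pre_);
-- dict lookups use first-match List.lookup with .getD standing for the KeyError/IndexError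
-- cases that Pre_ excludes; a dict comprehension / repeated assignment keyed over all_codons
-- keeps the FIRST position of a duplicate key (values recomputed equal), hence PySem.List.dedup.
def build_mutation_lookup_py (aa_to_codons : List (String × List String)) (codon_to_aa : List (String × String)) (synonymous : List (String × List String)) (stop_codons : List String) (all_codons : List String) : List (String × List (String × List String)) :=
  let dAll := PySem.List.dedup all_codons
  let keys := aa_to_codons.map Prod.fst
  -- aa_to_codons[aa][0]
  let firstOf := fun (aa : String) => (PySem.List.pyGet? ((List.lookup aa aa_to_codons).getD []) 0).getD ""
  -- codon_to_aa[codon]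
  let curOf := fun (codon : String) => (List.lookup codon codon_to_aa).getD ""
  let any_codon := dAll.map (fun codon => (codon, all_codons.filter (fun c => c != codon)))
  let ns_first := dAll.map (fun codon =>
    (codon, (keys.filter (fun aa => aa != curOf codon)).map firstOf))
  let ns_rand := dAll.map (fun codon =>
    (codon, aa_to_codons.foldl (fun muts p => if p.1 != curOf codon then muts ++ p.2 else muts) []))
  let mo_first := dAll.map (fun codon =>
    (codon, (keys.filter (fun aa => aa != curOf codon && aa != "*")).map firstOf))
  let mo_rand := dAll.map (fun codon =>
    (codon, aa_to_codons.foldl (fun muts p => if p.1 != curOf codon && p.1 != "*" then muts ++ p.2 else muts) []))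
  let syn := synonymous.map (fun p => (p.1, p.2))
  let nonsense := dAll.map (fun codon => (codon, if codon ∈ stop_codons then [] else stop_codons))
  [("any_codon", any_codon), ("nonsynonymous_first", ns_first), ("nonsynonymous_random", ns_rand),
   ("missense_only_first", mo_first), ("missense_only_random", mo_rand),
   ("synonymous", syn), ("nonsense", nonsense)]

-- ===== PORT B =====
-- B's helper row(aa): one loop over aa_to_codons.items() building the four "different AA" lists.
def pvRow (items : List (String × List String)) (aa : String) : List String × List String × List String × List String :=
  items.foldl (fun q p =>
    if p.1 != aa then
      let f := (PySem.List.pyGet? p.2 0).getD ""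
      if p.1 != "*" then (q.1 ++ [f], q.2.1 ++ p.2, q.2.2.1 ++ [f], q.2.2.2 ++ p.2)
      else (q.1 ++ [f], q.2.1 ++ p.2, q.2.2.1, q.2.2.2)
    else q) ([], [], [], [])

-- Port of B: memoized per-amino-acid index (cache), filled on demand in one pass over all_codons.
def build_mutation_lookup_py_alt (aa_to_codons : List (String × List String)) (codon_to_aa : List (String × String)) (synonymous : List (String × List String)) (stop_codons : List String) (all_codons : List String) : List (String × List (String × List String)) :=
  let dAll := PySem.List.dedup all_codons
  let rows := (dAll.foldl (fun s codon =>
    let aa := (List.lookup codon codon_to_aa).getD ""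
    let cache := if (s.1.get? aa).isSome then s.1 else s.1.insert aa (pvRow aa_to_codons aa)
    (cache, s.2 ++ [(codon, (cache.get? aa).getD ([], [], [], []))]))
    ((PySem.Dict.empty : PySem.Dict String (List String × List String × List String × List String)), [])).2
  [("any_codon", dAll.map (fun codon => (codon, all_codons.filter (fun c => c != codon)))),
   ("nonsynonymous_first", rows.map (fun r => (r.1, r.2.1))),
   ("nonsynonymous_random", rows.map (fun r => (r.1, r.2.2.1))),
   ("missense_only_first", rows.map (fun r => (r.1, r.2.2.2.1))),
   ("missense_only_random", rows.map (fun r => (r.1, r.2.2.2.2))),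
   ("synonymous", synonymous.map (fun p => (p.1, p.2))),
   ("nonsense", dAll.map (fun codon => (codon, if codon ∈ stop_codons then [] else stop_codons)))]

-- ===== PRECONDITION & SPEC =====
-- Pre_ excludes exactly the inputs where Python A raises: dict arguments with duplicate keys (not
-- representable as Python dicts), codons of all_codons missing from codon_to_aa (KeyError), and an
-- amino acid with an empty codon list whose first element A actually reads, i.e. when some codon of
-- all_codons maps to a DIFFERENT amino acid (IndexError); if no codon does, A returns and B matches.
def Pre_build_mutation_lookup_py (aa_to_codons : List (String × List String)) (codon_to_aa : List (String × String)) (synonymous : List (String × List String)) (stop_codons : List String) (all_codons : List String) : Prop :=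
  (aa_to_codons.map Prod.fst).Nodup ∧ (codon_to_aa.map Prod.fst).Nodup ∧
  (synonymous.map Prod.fst).Nodup ∧
  (∀ c ∈ all_codons, c ∈ codon_to_aa.map Prod.fst) ∧
  (∀ p ∈ aa_to_codons, p.2 = [] → ∀ c ∈ all_codons, (List.lookup c codon_to_aa).getD "" = p.1)
instance (aa_to_codons : List (String × List String)) (codon_to_aa : List (String × String)) (synonymous : List (String × List String)) (stop_codons : List String) (all_codons : List String) : Decidable (Pre_build_mutation_lookup_py aa_to_codons codon_to_aa synonymous stop_codons all_codons) := by unfold Pre_build_mutation_lookup_py; infer_instance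

def pvWitness_build_mutation_lookup_py : (List (String × List String)) × (List (String × String)) × (List (String × List String)) × List String × List String :=
  ([("M", ["ATG"]), ("*", ["TAA", "TAG"]), ("W", ["TGG"])],
   [("ATG", "M"), ("TAA", "*"), ("TAG", "*"), ("TGG", "W")],
   [("TAA", ["TAG"]), ("TAG", ["TAA"])],
   ["TAA", "TAG"],
   ["ATG", "TAA", "TAG", "TGG"])

def Spec_build_mutation_lookup_py (aa_to_codons : List (String × List String)) (codon_to_aa : List (String × String)) (synonymous : List (String × List String)) (stop_codons : List String) (all_codons : List String) (out : List (String × List (String × List String))) : Prop := out = build_mutation_lookup_py_alt aa_to_codons codon_to_aa synonymous stop_codons all_codons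
instance (aa_to_codons : List (String × List String)) (codon_to_aa : List (String × String)) (synonymous : List (String × List String)) (stop_codons : List String) (all_codons : List String) (out : List (String × List (String × List String))) : Decidable (Spec_build_mutation_lookup_py aa_to_codons codon_to_aa synonymous stop_codons all_codons out) := by unfold Spec_build_mutation_lookup_py; infer_instance

-- ===== CLAIM (what is proved, stated in full; the proofs are below) =====
def Claim_equal_build_mutation_lookup_py : Prop := ∀ (aa_to_codons : List (String × List String)) (codon_to_aa : List (String × String)) (synonymous : List (String × List String)) (stop_codons : List String) (all_codons : List String), Dom_build_mutation_lookup_py aa_to_codons codon_to_aa synonymous stop_codons all_codons → Pre_build_mutation_lookup_py aa_to_codons codon_to_aa synonymous stop_codons all_codons → Spec_build_mutation_lookup_py aa_to_codons codon_to_aa synonymous stop_codons all_codons (build_mutation_lookup_py aa_to_codons codon_to_aa synonymous stop_codons all_codons)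

-- ===== LEMMAS AND PROOFS =====

-- extend-under-a-test loop = flatMap of filter
theorem pv_foldl_append_if_flatMap {α β : Type} (l : List α) (q : α → Bool) (g : α → List β) (acc : List β) :
    l.foldl (fun acc x => if q x then acc ++ g x else acc) acc = acc ++ (l.filter q).flatMap g := by
  induction l generalizing acc with
  | nil => simp
  | cons x t ih => by_cases h : q x <;> simp [h, ih]

-- mapping a first-match lookup over the filtered key list = mapping over the filtered items (distinct keys)
theorem pv_lookup_map_filter {β : Type} (d : List (String × List String)) (hn : (d.map Prod.fst).Nodup)
    (q : String → Bool) (g : List String → β) :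
    ((d.map Prod.fst).filter q).map (fun aa => g ((List.lookup aa d).getD [])) =
      (d.filter (fun p => q p.1)).map (fun p => g p.2) := by
  induction d with
  | nil => simp
  | cons p t ih =>
    obtain ⟨k, v⟩ := p
    simp only [List.map_cons] at hn ⊢
    obtain ⟨hk, hnt⟩ := List.nodup_cons.mp hn
    have htail : ∀ aa ∈ (t.map Prod.fst).filter q,
        g ((List.lookup aa ((k, v) :: t)).getD []) = g ((List.lookup aa t).getD []) := by
      intro aa haa
      have hm : aa ∈ t.map Prod.fst := List.mem_of_mem_filter haa
      have hne : (aa == k) = false := by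
        simp only [beq_eq_false_iff_ne, ne_eq]
        exact fun h => hk (h ▸ hm)
      simp [List.lookup, hne]
    by_cases h : q k
    · simp only [List.filter_cons, h, if_pos, List.map_cons]
      rw [List.map_congr_left htail, ih hnt]
      simp [List.lookup]
    · simp only [List.filter_cons, h, Bool.false_eq_true, if_false]
      rw [List.map_congr_left htail, ih hnt]

-- pvRow computed from an accumulator
theorem pv_row_general (aa : String) :
    ∀ (items : List (String × List String)) (q : List String × List String × List String × List String),
      items.foldl (fun q p =>
        if p.1 != aa then
          let f := (PySem.List.pyGet? p.2 0).getD ""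
          if p.1 != "*" then (q.1 ++ [f], q.2.1 ++ p.2, q.2.2.1 ++ [f], q.2.2.2 ++ p.2)
          else (q.1 ++ [f], q.2.1 ++ p.2, q.2.2.1, q.2.2.2)
        else q) q =
      (q.1 ++ (items.filter (fun p => p.1 != aa)).map (fun p => (PySem.List.pyGet? p.2 0).getD ""),
       q.2.1 ++ (items.filter (fun p => p.1 != aa)).flatMap (fun p => p.2),
       q.2.2.1 ++ (items.filter (fun p => p.1 != aa && p.1 != "*")).map (fun p => (PySem.List.pyGet? p.2 0).getD ""),
       q.2.2.2 ++ (items.filter (fun p => p.1 != aa && p.1 != "*")).flatMap (fun p => p.2)) := by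
  intro items
  induction items with
  | nil => simp
  | cons p t ih =>
    intro q
    simp only [List.foldl_cons]
    by_cases h1 : p.1 = aa
    · rw [if_neg (by simp [h1]), ih]
      simp [h1]
    · by_cases h2 : p.1 = "*"
      · have h3 : ("*" : String) ≠ aa := by rw [← h2]; exact h1
        rw [if_pos (by simp [h1]), if_neg (by simp [h2]), ih]
        simp [h2, h3, List.append_assoc]
      · rw [if_pos (by simp [h1]), if_pos (by simp [h2]), ih]
        simp [h1, h2, List.append_assoc]

theorem pv_row_eq (items : List (String × List String)) (aa : String) :
    pvRow items aa =
      ((items.filter (fun p => p.1 != aa)).map (fun p => (PySem.List.pyGet? p.2 0).getD ""),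
       (items.filter (fun p => p.1 != aa)).flatMap (fun p => p.2),
       (items.filter (fun p => p.1 != aa && p.1 != "*")).map (fun p => (PySem.List.pyGet? p.2 0).getD ""),
       (items.filter (fun p => p.1 != aa && p.1 != "*")).flatMap (fun p => p.2)) := by
  unfold pvRow
  simpa using pv_row_general aa items ([], [], [], [])

-- the memoizing pass: if every cached row is pvRow of its key, the emitted rows are pvRow of the current AA
theorem pv_memo_rows (items : List (String × List String)) (codon_to_aa : List (String × String)) :
    ∀ (l : List String)
      (cache : PySem.Dict String (List String × List String × List String × List String))
      (acc : List (String × (List String × List String × List String × List String))),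
      (∀ k v, cache.get? k = some v → v = pvRow items k) →
      (l.foldl (fun s codon =>
        let aa := (List.lookup codon codon_to_aa).getD ""
        let cache := if (s.1.get? aa).isSome then s.1 else s.1.insert aa (pvRow items aa)
        (cache, s.2 ++ [(codon, (cache.get? aa).getD ([], [], [], []))])) (cache, acc)).2 =
      acc ++ l.map (fun codon => (codon, pvRow items ((List.lookup codon codon_to_aa).getD ""))) := by
  intro l
  induction l with
  | nil => simp
  | cons c t ih =>
    intro cache acc hinv
    simp only [List.foldl_cons]
    by_cases h : ((cache.get? ((List.lookup c codon_to_aa).getD "")).isSome)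
    · obtain ⟨v, hv⟩ := Option.isSome_iff_exists.mp h
      rw [if_pos h, ih cache _ hinv]
      simp [hv, hinv _ _ hv]
    · rw [if_neg h]
      have hinv' : ∀ k v, (cache.insert ((List.lookup c codon_to_aa).getD "")
          (pvRow items ((List.lookup c codon_to_aa).getD ""))).get? k = some v → v = pvRow items k := by
        intro k v hkv
        rw [PySem.Dict.get?_insert] at hkv
        by_cases hk : k = (List.lookup c codon_to_aa).getD ""
        · rw [if_pos hk] at hkv
          rw [hk]; exact (Option.some_inj.mp hkv).symm
        · rw [if_neg hk] at hkv
          exact hinv _ _ hkv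
      rw [ih _ _ hinv']
      simp [PySem.Dict.get?_insert_self]

-- ===== VERDICT (by name: the statement is the Claim_ definition above) =====
theorem build_mutation_lookup_py_spec : Claim_equal_build_mutation_lookup_py := by
  intro aa_to_codons codon_to_aa synonymous stop_codons all_codons _ hpre
  obtain ⟨hn, -, -, -, -⟩ := hpre
  have h1 := fun cur => pv_lookup_map_filter aa_to_codons hn (fun aa => aa != cur)
    (fun l => (PySem.List.pyGet? l 0).getD "")
  have h2 := fun cur => pv_lookup_map_filter aa_to_codons hn (fun aa => aa != cur && aa != "*")
    (fun l => (PySem.List.pyGet? l 0).getD "")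
  unfold Spec_build_mutation_lookup_py
  simp only [build_mutation_lookup_py, build_mutation_lookup_py_alt]
  rw [pv_memo_rows aa_to_codons codon_to_aa (PySem.List.dedup all_codons) PySem.Dict.empty []
    (by intro k v hkv; simp [PySem.Dict.get?_empty] at hkv)]
  simp only [List.nil_append, List.map_map]
  simp only [pv_row_eq, pv_foldl_append_if_flatMap]
  simp [h1, h2]
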